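-- pv_equiv track=rewrite | github.com/mfzorlu/CP-Contest-Templates | basics/coin_problem.py | coin_change_at_least
-- ===== SOURCE A (Python) =====
-- from typing import List, Tuple
--
-- def coin_change_min(coins: List[int], amount: int) -> int:
--     """
--     Minimum number of coins to make exact amount
--     Returns -1 if impossible
--     Time: O(amount * len(coins)), Space: O(amount)
--
--     Example: coins=[1,2,5], amount=11 → 3 (5+5+1)
--     """
--     dp = [float('inf')] * (amount + 1)
--     dp[0] = 0
--
--     for i in range(1, amount + 1):
--         for coin in coins:
--             if coin <= i and dp[i - coin] != float('inf'):
--                 dp[i] = min(dp[i], dp[i - coin] + 1)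
--
--     return dp[amount] if dp[amount] != float('inf') else -1
--
-- def coin_change_at_least(coins: List[int], min_amount: int) -> int:
--     """
--     Minimum coins to make AT LEAST min_amount
--     """
--     # Try amounts from min_amount to some reasonable upper bound
--     max_try = min_amount + max(coins) if coins else min_amount
--
--     min_coins = float('inf')
--     for target in range(min_amount, max_try + 1):
--         result = coin_change_min(coins, target)
--         if result != -1:
--             min_coins = min(min_coins, result)
--             break
--
--     return min_coins if min_coins != float('inf') else -1
-- ===== SOURCE B (Python) =====
-- def coin_change_at_least(coins, min_amount):
--     # One bottom-up unbounded-coin DP, stopping at the first reachable index >= min_amount,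
--     # instead of a fresh full DP per candidate target.
--     max_try = min_amount + max(coins) if coins else min_amount
--     if max_try < min_amount:      # max(coins) < 0: the candidate range is empty
--         return -1
--     if min_amount <= 0:
--         return 0                  # zero coins already reach the target
--     dp = [None] * (max_try + 1)
--     dp[0] = 0
--     for i in range(1, max_try + 1):
--         best = None
--         for c in coins:
--             if 0 < c <= i and dp[i - c] is not None:
--                 v = dp[i - c] + 1
--                 if best is None or v < best:
--                     best = v
--         dp[i] = best
--         if best is not None and i >= min_amount:
--             return best
--     return -1
-- ===== Notes on version B (the rewrite author's own statement) =====
-- stated objective: alternative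
-- what changed: A runs a fresh full coin_change_min DP (a brand-new table per candidate target) until one succeeds; B fills a single bottom-up DP table once, returning at the first reachable index >= min_amount, and answers the empty-range and min_amount <= 0 cases without building any table.
import Mathlib
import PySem

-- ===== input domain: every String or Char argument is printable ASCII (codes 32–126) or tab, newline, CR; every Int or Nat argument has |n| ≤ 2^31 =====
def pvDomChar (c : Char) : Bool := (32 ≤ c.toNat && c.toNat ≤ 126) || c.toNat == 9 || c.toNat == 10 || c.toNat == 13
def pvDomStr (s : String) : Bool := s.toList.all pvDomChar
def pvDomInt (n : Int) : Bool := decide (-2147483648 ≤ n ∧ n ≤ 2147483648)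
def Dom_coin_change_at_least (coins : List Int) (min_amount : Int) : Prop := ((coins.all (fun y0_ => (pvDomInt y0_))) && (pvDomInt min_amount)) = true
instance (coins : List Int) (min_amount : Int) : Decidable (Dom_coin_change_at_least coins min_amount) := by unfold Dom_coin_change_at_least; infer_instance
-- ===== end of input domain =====

-- B replaces A's fresh full coin_change_min DP per candidate target by ONE bottom-up DP loop
-- that stops at the first reachable index >= min_amount (objective: alternative).

-- ===== PORT A =====
-- dp entries: `none` stands for float('inf').  An out-of-range dp read folds to `none` here,
-- where Python raises IndexError; Pre_ excludes exactly those inputs.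
def ccmUpd (i : Nat) (dp : List (Option Int)) (c : Int) : List (Option Int) :=
  if c ≤ (i : Int) then
    match (PySem.List.pyGet? dp ((i : Int) - c)).join with
    | some v =>
        dp.set i (match (PySem.List.pyGet? dp ((i : Int))).join with
                  | some cur => some (min cur (v + 1))
                  | none => some (v + 1))
    | none => dp
  else dp

def ccmLoop (coins : List Int) (n : Nat) : List (Option Int) :=
  (List.range' 1 n).foldl (fun dp i => coins.foldl (ccmUpd i) dp)
    (some 0 :: List.replicate n (none : Option Int))

-- coin_change_min; for amount < 0 Python raises IndexError (dp[0] = 0 on an empty list) — unreached inside Pre_.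
def coin_change_min_port (coins : List Int) (amount : Int) : Int :=
  if amount < 0 then -1
  else
    match (PySem.List.pyGet? (ccmLoop coins amount.toNat) amount).join with
    | some v => v
    | none => -1

-- the target loop (it breaks at the first result ≠ -1)
def tryTargets (coins : List Int) : List Int → Int
  | [] => -1
  | t :: ts =>
      let r := coin_change_min_port coins t
      if r ≠ -1 then r else tryTargets coins ts

def coin_change_at_least (coins : List Int) (min_amount : Int) : Int :=
  let max_try := match PySem.List.max? coins (fun x => x) with
                 | some mx => min_amount + mx
                 | none => min_amount
  tryTargets coins (PySem.List.pyRange min_amount (max_try + 1) 1)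

-- ===== PORT B =====
-- inner loop of B: running best over the coins, reading the single shared table
def altStep (i : Nat) (dp : List (Option Int)) (best : Option Int) (c : Int) : Option Int :=
  if 0 < c ∧ c ≤ (i : Int) then
    match (PySem.List.pyGet? dp ((i : Int) - c)).join with
    | some v =>
        match best with
        | none => some (v + 1)
        | some b => if v + 1 < b then some (v + 1) else some b
    | none => best
  else best

def altBest (coins : List Int) (dp : List (Option Int)) (i : Nat) : Option Int :=
  coins.foldl (altStep i dp) none

-- B's for-loop: fill dp[i] and return as soon as i >= min_amount is reachable
def altLoop (coins : List Int) (min_amount : Int) : List (Option Int) → List Nat → Int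
  | _, [] => -1
  | dp, i :: rest =>
      let best := altBest coins dp i
      let dp' := dp.set i best
      match best with
      | some v =>
          if min_amount ≤ (i : Int) then v
          else altLoop coins min_amount dp' rest
      | none => altLoop coins min_amount dp' rest

def coin_change_at_least_alt (coins : List Int) (min_amount : Int) : Int :=
  let max_try := match PySem.List.max? coins (fun x => x) with
                 | some mx => min_amount + mx
                 | none => min_amount
  if max_try < min_amount then -1
  else if min_amount ≤ 0 then 0
  else
    altLoop coins min_amount (some 0 :: List.replicate max_try.toNat (none : Option Int))
      (List.range' 1 max_try.toNat)

-- ===== PRECONDITION & SPEC =====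
-- Pre_ excludes exactly the inputs on which A raises IndexError: a positive min_amount with a
-- negative coin alongside a nonnegative one (coin_change_min then indexes past the end of dp),
-- and a negative min_amount unless all coins are negative (a negative target makes dp empty,
-- so dp[0] = 0 raises).
def Pre_coin_change_at_least (coins : List Int) (min_amount : Int) : Prop :=
  (0 < min_amount → (∀ c ∈ coins, 0 ≤ c) ∨ (∀ c ∈ coins, c < 0)) ∧
  (min_amount < 0 → coins ≠ [] ∧ ∀ c ∈ coins, c < 0)
instance (coins : List Int) (min_amount : Int) : Decidable (Pre_coin_change_at_least coins min_amount) := by unfold Pre_coin_change_at_least; infer_instance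
def pvWitness_coin_change_at_least : List Int × Int := ([1, 2, 5], 11)

def Spec_coin_change_at_least (coins : List Int) (min_amount : Int) (out : Int) : Prop := out = coin_change_at_least_alt coins min_amount
instance (coins : List Int) (min_amount : Int) (out : Int) : Decidable (Spec_coin_change_at_least coins min_amount out) := by unfold Spec_coin_change_at_least; infer_instance

-- ===== CLAIM (what is proved, stated in full; the proofs are below) =====
def Claim_equal_coin_change_at_least : Prop := ∀ (coins : List Int) (min_amount : Int), Dom_coin_change_at_least coins min_amount → Pre_coin_change_at_least coins min_amount → Spec_coin_change_at_least coins min_amount (coin_change_at_least coins min_amount)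

-- ===== LEMMAS AND PROOFS =====

-- proof-side device: scanning a finished table for the first reachable target
def altScan (dp : List (Option Int)) : List Int → Int
  | [] => -1
  | t :: ts =>
      match (PySem.List.pyGet? dp t).join with
      | some v => v
      | none => altScan dp ts

-- the DP table built back-to-front: the common specification of both ports' tables
def dpTab (coins : List Int) : Nat → List (Option Int)
  | 0 => [some 0]
  | m + 1 => dpTab coins m ++ [altBest coins (dpTab coins m) (m + 1)]

theorem length_dpTab (coins : List Int) (m : Nat) : (dpTab coins m).length = m + 1 := by
  induction m with
  | zero => rfl
  | succ k ih => simp [dpTab, ih]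

theorem set_append_cons {α : Type} (P : List α) (x y : α) (S : List α) :
    (P ++ x :: S).set P.length y = P ++ y :: S := by
  induction P with
  | nil => rfl
  | cons a t ih => simp [ih]

theorem getElem?_dpTab_of_le (coins : List Int) (t m : Nat) (h : t ≤ m) :
    (dpTab coins m)[t]? = (dpTab coins t)[t]? := by
  induction m with
  | zero => have : t = 0 := by omega
            subst this; rfl
  | succ k ih =>
    rcases Nat.lt_or_ge t (k + 1) with hlt | hge
    · have := ih (by omega)
      rw [dpTab, List.getElem?_append_left (by rw [length_dpTab]; omega), this]
    · have : t = k + 1 := by omega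
      subst this; rfl

theorem altStep_congr (i : Nat) (dp1 dp2 : List (Option Int))
    (h : ∀ k : Nat, k < i → dp1[k]? = dp2[k]?) (best : Option Int) (c : Int) :
    altStep i dp1 best c = altStep i dp2 best c := by
  unfold altStep
  by_cases hc : 0 < c ∧ c ≤ (i : Int)
  · have h0 : (0:Int) ≤ (i : Int) - c := by omega
    have hlt : ((i : Int) - c).toNat < i := by omega
    rw [if_pos hc, if_pos hc, PySem.List.pyGet?_of_nonneg dp1 h0,
        PySem.List.pyGet?_of_nonneg dp2 h0, h _ hlt]
  · rw [if_neg hc, if_neg hc]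

theorem altBest_congr (coins : List Int) (i : Nat) (dp1 dp2 : List (Option Int))
    (h : ∀ k : Nat, k < i → dp1[k]? = dp2[k]?) :
    altBest coins dp1 i = altBest coins dp2 i := by
  unfold altBest
  generalize (none : Option Int) = best
  induction coins generalizing best with
  | nil => rfl
  | cons c rest ih => rw [List.foldl_cons, List.foldl_cons, altStep_congr i dp1 dp2 h best c, ih]


theorem ccmUpd_eq_altStep (i : Nat) (P S : List (Option Int)) (hP : P.length = i)
    (acc : Option Int) (c : Int) (hc0 : 0 ≤ c) :
    ccmUpd i (P ++ acc :: S) c = P ++ (altStep i P acc c) :: S := by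
  subst hP
  unfold ccmUpd altStep
  by_cases hci : c ≤ (P.length : Int)
  · rcases eq_or_lt_of_le hc0 with hz | hpos
    · -- c = 0 : the update reads dp[len P] itself and never changes it
      subst hz
      rw [if_pos hci, sub_zero, PySem.List.pyGet?_append_length]
      cases acc with
      | none => simp
      | some b =>
        simp
    · -- 0 < c : the update reads an already-final entry of P
      have h0 : (0 : Int) ≤ (P.length : Int) - c := by omega
      have hlt : ((P.length : Int) - c).toNat < P.length := by omega
      have hread : PySem.List.pyGet? (P ++ acc :: S) ((P.length : Int) - c)
          = PySem.List.pyGet? P ((P.length : Int) - c) := by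
        rw [PySem.List.pyGet?_of_nonneg _ h0, PySem.List.pyGet?_of_nonneg _ h0,
            List.getElem?_append_left hlt]
      rw [if_pos hci, if_pos ⟨hpos, hci⟩, hread]
      cases hv : (PySem.List.pyGet? P ((P.length : Int) - c)).join with
      | none => rfl
      | some v =>
        rw [PySem.List.pyGet?_append_length]
        cases acc with
        | none => simp
        | some b =>
          by_cases hvb : v + 1 < b
          · have hmin : min b (v + 1) = v + 1 := by omega
            simp [hmin, hvb]
          · have hmin : min b (v + 1) = b := by omega
            simp [hmin, hvb]
  · rw [if_neg hci, if_neg (by intro h; exact hci h.2)]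

theorem foldl_ccmUpd_eq (coins : List Int) (hc : ∀ c ∈ coins, 0 ≤ c) (i : Nat)
    (P S : List (Option Int)) (hP : P.length = i) :
    ∀ acc : Option Int,
      coins.foldl (ccmUpd i) (P ++ acc :: S) = P ++ (coins.foldl (altStep i P) acc) :: S := by
  induction coins with
  | nil => intro acc; rfl
  | cons c rest ih =>
    intro acc
    rw [List.foldl_cons, List.foldl_cons,
        ccmUpd_eq_altStep i P S hP acc c (hc c (List.mem_cons_self ..))]
    exact ih (fun x hx => hc x (List.mem_cons_of_mem _ hx)) _

theorem ccmLoop_aux (coins : List Int) (hc : ∀ c ∈ coins, 0 ≤ c) (n k : Nat) (h : k ≤ n) :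
    (List.range' 1 k).foldl (fun dp i => coins.foldl (ccmUpd i) dp)
        (some 0 :: List.replicate n (none : Option Int))
      = dpTab coins k ++ List.replicate (n - k) (none : Option Int) := by
  induction k with
  | zero => simp [dpTab]
  | succ k ih =>
    have hrep : List.replicate (n - k) (none : Option Int)
        = none :: List.replicate (n - (k + 1)) (none : Option Int) := by
      rw [← List.replicate_succ]; congr 1; omega
    have hstep : (1 : Nat) + 1 * k = k + 1 := by ring
    rw [List.range'_concat, List.foldl_append, ih (by omega), hstep, hrep, List.foldl_cons,
        List.foldl_nil,
        foldl_ccmUpd_eq coins hc (k + 1) (dpTab coins k) _ (length_dpTab coins k) none]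
    rw [dpTab]
    simp [altBest]

theorem ccmLoop_eq (coins : List Int) (hc : ∀ c ∈ coins, 0 ≤ c) (n : Nat) :
    ccmLoop coins n = dpTab coins n := by
  have := ccmLoop_aux coins hc n n le_rfl
  simpa [ccmLoop] using this

theorem foldl_altStep_nonneg (i : Nat) (dp : List (Option Int))
    (hdp : ∀ o ∈ dp, ∀ v : Int, o = some v → 0 ≤ v) :
    ∀ (cs : List Int) (best : Option Int), (∀ v : Int, best = some v → 0 ≤ v) →
      ∀ v : Int, cs.foldl (altStep i dp) best = some v → 0 ≤ v := by
  intro cs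
  induction cs with
  | nil => intro best hb v hv; exact hb v hv
  | cons c rest ih =>
    intro best hb v hv
    rw [List.foldl_cons] at hv
    refine ih (altStep i dp best c) ?_ v hv
    intro w hw
    unfold altStep at hw
    split at hw
    · cases hg : PySem.List.pyGet? dp ((i : Int) - c) with
      | none => rw [hg] at hw; exact hb w hw
      | some o =>
        rw [hg] at hw
        cases o with
        | none => exact hb w hw
        | some u =>
          have hu : 0 ≤ u := hdp _ (PySem.List.mem_of_pyGet?_eq_some dp hg) u rfl
          simp only [Option.join_some] at hw
          cases best with
          | none => injection hw with hw; omega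
          | some b =>
            have hbb : 0 ≤ b := hb b rfl
            have hw' : (if u + 1 < b then some (u + 1) else some b) = some w := hw
            split at hw' <;> (injection hw' with hw'; omega)
    · exact hb w hw

theorem dpTab_nonneg (coins : List Int) (m : Nat) :
    ∀ o ∈ dpTab coins m, ∀ v : Int, o = some v → 0 ≤ v := by
  induction m with
  | zero =>
    intro o ho v hv
    simp [dpTab] at ho
    subst ho
    simp at hv
    omega
  | succ k ih =>
    intro o ho v hv
    rw [dpTab, List.mem_append] at ho
    rcases ho with ho | ho
    · exact ih o ho v hv
    · simp at ho
      subst ho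
      exact foldl_altStep_nonneg (k + 1) (dpTab coins k) ih coins none (by simp) v hv

theorem scan_eq (coins : List Int) (hc : ∀ c ∈ coins, 0 ≤ c) (m : Nat) :
    ∀ ts : List Int, (∀ t ∈ ts, 0 ≤ t ∧ t.toNat ≤ m) →
      tryTargets coins ts = altScan (dpTab coins m) ts := by
  intro ts
  induction ts with
  | nil => intro _; rfl
  | cons t ts' ih =>
    intro h
    obtain ⟨ht0, htm⟩ := h t (List.mem_cons_self ..)
    have hrest := fun x hx => h x (List.mem_cons_of_mem _ hx)
    have hlen : t.toNat < (dpTab coins t.toNat).length := by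
      rw [length_dpTab]; omega
    have hA : PySem.List.pyGet? (ccmLoop coins t.toNat) t
        = some ((dpTab coins t.toNat)[t.toNat]'hlen) := by
      rw [ccmLoop_eq coins hc, PySem.List.pyGet?_of_nonneg _ ht0, List.getElem?_eq_getElem hlen]
    have hB : PySem.List.pyGet? (dpTab coins m) t
        = some ((dpTab coins t.toNat)[t.toNat]'hlen) := by
      rw [PySem.List.pyGet?_of_nonneg _ ht0, getElem?_dpTab_of_le coins t.toNat m htm,
          List.getElem?_eq_getElem hlen]
    simp only [tryTargets, altScan, coin_change_min_port, hB]
    rw [if_neg (by omega : ¬ t < 0)]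
    rw [hA]
    cases he : (dpTab coins t.toNat)[t.toNat]'hlen with
    | none =>
      simp only [Option.join_some]
      rw [if_neg (by simp)]
      exact ih hrest
    | some v =>
      have hv : 0 ≤ v := dpTab_nonneg coins t.toNat _ (List.getElem_mem hlen) v he
      simp only [Option.join_some]
      rw [if_pos (by omega : (v : Int) ≠ -1)]

-- B's fused loop, started after step k, behaves like scanning the finished table
-- from target max(min_amount, k+1)
-- B's fused loop, started after step k, behaves like scanning the finished table
-- from target max(min_amount, k+1)
theorem altLoop_eq (coins : List Int) (ma : Int) (m : Nat) :
    ∀ (n k : Nat), k ≤ m → m - k = n →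
      altLoop coins ma (dpTab coins k ++ List.replicate (m - k) (none : Option Int))
          (List.range' (k + 1) (m - k))
        = altScan (dpTab coins m)
            (PySem.List.pyRange (max ma ((k : Int) + 1)) ((m : Int) + 1) 1) := by
  intro n
  induction n with
  | zero =>
    intro k hk hn
    have hkm : k = m := by omega
    subst hkm
    rw [hn, PySem.List.pyRange_one_eq_nil (le_max_right _ _)]
    rfl
  | succ n ih =>
    intro k hk hn
    have hklt : k < m := by omega
    have hrep : List.replicate (m - k) (none : Option Int)
        = none :: List.replicate (m - (k + 1)) (none : Option Int) := by
      rw [← List.replicate_succ]; congr 1; omega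
    have hrange : List.range' (k + 1) (m - k) = (k + 1) :: List.range' (k + 1 + 1) n := by
      rw [hn, List.range'_succ]
    rw [hrep, hrange]
    have hbest : altBest coins (dpTab coins k ++ none :: List.replicate (m - (k + 1)) none) (k + 1)
        = altBest coins (dpTab coins k) (k + 1) := by
      apply altBest_congr
      intro j hj
      have hjlen : j < (dpTab coins k).length := by rw [length_dpTab]; omega
      rw [List.getElem?_append_left hjlen]
    have hset : (dpTab coins k ++ none :: List.replicate (m - (k + 1)) none).set (k + 1)
          (altBest coins (dpTab coins k) (k + 1))
        = dpTab coins (k + 1) ++ List.replicate (m - (k + 1)) none := by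
      have := set_append_cons (dpTab coins k) (none : Option Int)
        (altBest coins (dpTab coins k) (k + 1)) (List.replicate (m - (k + 1)) none)
      rw [length_dpTab] at this
      rw [this, dpTab]
      simp
    have hlast : (dpTab coins k ++ [altBest coins (dpTab coins k) (k + 1)])[k + 1]?
        = some (altBest coins (dpTab coins k) (k + 1)) := by
      have h := List.getElem?_concat_length
        (l := dpTab coins k) (a := altBest coins (dpTab coins k) (k + 1))
      rwa [length_dpTab] at h
    have hentry : PySem.List.pyGet? (dpTab coins m) ((k : Int) + 1)
        = some (altBest coins (dpTab coins k) (k + 1)) := by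
      have hcast : ((k : Int) + 1) = (((k + 1 : Nat) : Nat) : Int) := by push_cast; ring
      rw [hcast, PySem.List.pyGet?_natCast, getElem?_dpTab_of_le coins (k + 1) m (by omega),
          dpTab, hlast]
    have hn' : n = m - (k + 1) := by omega
    simp only [altLoop, hbest, hset]
    by_cases hma : ma ≤ (k : Int) + 1
    · rw [max_eq_right hma, PySem.List.pyRange_one_cons (by omega : (k : Int) + 1 < (m : Int) + 1)]
      cases hb : altBest coins (dpTab coins k) (k + 1) with
      | some v =>
        rw [hb] at hentry
        simp only [altScan, hentry, Option.join_some]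
        rw [if_pos (by push_cast; omega : ma ≤ ((k + 1 : Nat) : Int))]
      | none =>
        rw [hb] at hentry
        simp only [altScan, hentry, Option.join_some]
        rw [hn', ih (k + 1) (by omega) (by omega),
            max_eq_right (by push_cast; omega : ma ≤ ((k + 1 : Nat) : Int) + 1)]
        push_cast
        ring_nf
    · rw [max_eq_left (by omega : (k : Int) + 1 ≤ ma)]
      cases hb : altBest coins (dpTab coins k) (k + 1) with
      | some v =>
        show (if ma ≤ ((k + 1 : Nat) : Int) then v
              else altLoop coins ma (dpTab coins (k + 1) ++ List.replicate (m - (k + 1)) none)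
                (List.range' (k + 1 + 1) n))
            = altScan (dpTab coins m) (PySem.List.pyRange ma ((m : Int) + 1) 1)
        rw [if_neg (by push_cast; omega : ¬ ma ≤ ((k + 1 : Nat) : Int))]
        rw [hn', ih (k + 1) (by omega) (by omega),
            max_eq_left (by push_cast; omega : ((k + 1 : Nat) : Int) + 1 ≤ ma)]
      | none =>
        show altLoop coins ma (dpTab coins (k + 1) ++ List.replicate (m - (k + 1)) none)
              (List.range' (k + 1 + 1) n)
            = altScan (dpTab coins m) (PySem.List.pyRange ma ((m : Int) + 1) 1)
        rw [hn', ih (k + 1) (by omega) (by omega),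
            max_eq_left (by push_cast; omega : ((k + 1 : Nat) : Int) + 1 ≤ ma)]

theorem coin_change_at_least_spec : Claim_equal_coin_change_at_least := by
  intro coins min_amount _hdom hpre
  obtain ⟨h1, h2⟩ := hpre
  unfold Spec_coin_change_at_least coin_change_at_least coin_change_at_least_alt
  cases hmx : PySem.List.max? coins (fun x => x) with
  | none =>
    have hnil : coins = [] := (PySem.List.max?_eq_none_iff coins _).mp hmx
    subst hnil
    have hm0 : 0 ≤ min_amount := by
      by_contra h
      exact (h2 (by omega)).1 rfl
    simp only
    rw [if_neg (lt_irrefl min_amount)]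
    rcases eq_or_lt_of_le hm0 with hz | hposm
    · have hz0 : min_amount = 0 := hz.symm
      subst hz0
      rw [if_pos le_rfl]
      decide
    · rw [if_neg (by omega)]
      have hb1 : ∀ t ∈ PySem.List.pyRange min_amount (min_amount + 1) 1,
          0 ≤ t ∧ t.toNat ≤ min_amount.toNat := by
        intro t ht
        rw [PySem.List.mem_pyRange_one] at ht
        obtain ⟨hta, htb⟩ := ht
        exact ⟨by omega, Int.toNat_le_toNat (by omega)⟩
      have hA := scan_eq [] (by simp) min_amount.toNat
        (PySem.List.pyRange min_amount (min_amount + 1) 1) hb1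
      rw [hA]
      have hB := altLoop_eq ([] : List Int) min_amount min_amount.toNat min_amount.toNat 0
        (by omega) (by omega)
      simp only [Nat.sub_zero, Nat.cast_zero, zero_add] at hB
      have hcast : ((min_amount.toNat : Nat) : Int) = min_amount := Int.toNat_of_nonneg hm0
      rw [show dpTab ([] : List Int) 0 ++ List.replicate min_amount.toNat (none : Option Int)
            = some 0 :: List.replicate min_amount.toNat (none : Option Int) from rfl] at hB
      rw [hB, hcast, max_eq_left (by omega)]
  | some mx =>
    have hmem : mx ∈ coins := PySem.List.max?_mem hmx
    have hmax : ∀ y ∈ coins, y ≤ mx := PySem.List.max?_isMax hmx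
    rcases lt_or_ge mx 0 with hneg | hpos
    · -- all coins negative: the target range is empty, B's guard fires
      simp only
      rw [PySem.List.pyRange_one_eq_nil (by omega : min_amount + mx + 1 ≤ min_amount),
          if_pos (by omega : min_amount + mx < min_amount)]
      rfl
    · have hm0 : 0 ≤ min_amount := by
        by_contra h
        push Not at h
        have := (h2 h).2 mx hmem
        omega
      simp only
      rw [if_neg (by omega : ¬ min_amount + mx < min_amount)]
      rcases eq_or_lt_of_le hm0 with hz | hposm
      · -- min_amount = 0: the first target 0 is reached with 0 coins on both sides
        have hz0 : min_amount = 0 := hz.symm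
        subst hz0
        rw [if_pos le_rfl, PySem.List.pyRange_one_cons (by omega : (0:Int) < 0 + mx + 1)]
        simp only [tryTargets, coin_change_min_port]
        rw [if_neg (by omega : ¬ (0:Int) < 0)]
        have hc0 : PySem.List.pyGet? (ccmLoop coins (0:Int).toNat) 0 = some (some 0) := rfl
        rw [hc0]
        simp only [Option.join_some]
        rw [if_pos (by omega : (0:Int) ≠ -1)]
      · -- 0 < min_amount: all coins are nonnegative; both sides scan the shared table
        have hall : ∀ c ∈ coins, 0 ≤ c := by
          rcases h1 hposm with h | h
          · exact h
          · exact absurd (h mx hmem) (by omega)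
        rw [if_neg (by omega : ¬ min_amount ≤ 0)]
        have hb1 : ∀ t ∈ PySem.List.pyRange min_amount (min_amount + mx + 1) 1,
            0 ≤ t ∧ t.toNat ≤ (min_amount + mx).toNat := by
          intro t ht
          rw [PySem.List.mem_pyRange_one] at ht
          obtain ⟨hta, htb⟩ := ht
          have hta' : min_amount ≤ t := hta
          have htb' : t < min_amount + mx + 1 := htb
          clear hta htb
          exact ⟨by omega, Int.toNat_le_toNat (by omega)⟩
        have hA := scan_eq coins hall (min_amount + mx).toNat
          (PySem.List.pyRange min_amount (min_amount + mx + 1) 1) hb1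
        rw [hA]
        have hB := altLoop_eq coins min_amount (min_amount + mx).toNat (min_amount + mx).toNat 0
          (by omega) (by omega)
        simp only [Nat.sub_zero, Nat.cast_zero, zero_add] at hB
        have hcast : (((min_amount + mx).toNat : Nat) : Int) = min_amount + mx :=
          Int.toNat_of_nonneg (by omega)
        rw [show dpTab coins 0 ++ List.replicate (min_amount + mx).toNat (none : Option Int)
              = some 0 :: List.replicate (min_amount + mx).toNat (none : Option Int) from rfl] at hB
        rw [hB, hcast, max_eq_left (by omega)]
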